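-- pv_equiv track=rewrite | github.com/eaubinais/Meta_Problems | Level 3/Stack Stabilization 2.py | getMinStabilization
-- ===== SOURCE A (Python) =====
-- from typing import List
--
-- def getMinStabilization(N: int, R: List[int], A: int, B: int) -> int:
--     ## Redefine Problem
--     R_ = [r - i for i, r in enumerate(R)]
--
--     ## Get Key Radii
--     key_radii = {max(1, r) for r in R_}
--     key_radii = list(key_radii)
--     key_radii.sort()
--
--     cost_for_radius = [0] * len(key_radii)
--     for r in R_:
--         for i, key_radius in enumerate(key_radii):
--             delta = key_radius - r
--             cost = 0
--
--             if delta > 0: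
--                 cost = delta * A
--             else:
--                 cost = -delta * B
--
--             if i == 0:
--                 cost_for_radius[0] += cost
--             else:
--                 cost_for_radius[i] = min(cost_for_radius[i-1], cost_for_radius[i] + cost)
--
--     return cost_for_radius[-1]
-- ===== SOURCE B (Python) =====
-- from typing import List
--
-- def getMinStabilization(N: int, R: List[int], A: int, B: int) -> int:
--     # Slope trick: maintain the decreasing part of the convex piecewise-linear
--     # cost function as a descending list of (breakpoint, slope-weight) pairs.
--     bp = []          # descending by breakpoint, max breakpoint first; weights > 0
--     cost = 0
--     for i, r in enumerate(R):
--         v = r - i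
--         if v < 1:                 # targets are clamped to >= 1
--             cost += A * (1 - v)
--             v = 1
--         # add B*max(0, v-k) + A*max(0, k-v); cancel up to A units of positive
--         # slope against the steepest breakpoints above v, paying for the lift
--         need = A
--         while need > 0 and bp and bp[0][0] > v:
--             b, w = bp[0]
--             t = min(need, w)
--             cost += t * (b - v)
--             need -= t
--             if t == w:
--                 bp.pop(0)
--             else:
--                 bp[0][1] = w - t
--         wnew = B + (A - need)
--         if wnew > 0:
--             j = 0
--             while j < len(bp) and bp[j][0] > v:
--                 j += 1
--             bp.insert(j, [v, wnew])
--     return cost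
-- ===== Notes on version B (the rewrite author's own statement) =====
-- stated objective: faster
-- what changed: B replaces A's full DP sweep over every (candidate radius, disc) pair by slope trick: it maintains only the breakpoints of the convex piecewise-linear cost function in a weighted descending list, cancelling at most A units of slope per disc, instead of recomputing a cost row of length K per disc.
-- outside the precondition, e.g. on getMinStabilization(2, [3, 1], -1, 2): A returns -3, B returns -1; on getMinStabilization(2, [3, 1], 2, -1): A returns 0, B returns 2
import Mathlib
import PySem

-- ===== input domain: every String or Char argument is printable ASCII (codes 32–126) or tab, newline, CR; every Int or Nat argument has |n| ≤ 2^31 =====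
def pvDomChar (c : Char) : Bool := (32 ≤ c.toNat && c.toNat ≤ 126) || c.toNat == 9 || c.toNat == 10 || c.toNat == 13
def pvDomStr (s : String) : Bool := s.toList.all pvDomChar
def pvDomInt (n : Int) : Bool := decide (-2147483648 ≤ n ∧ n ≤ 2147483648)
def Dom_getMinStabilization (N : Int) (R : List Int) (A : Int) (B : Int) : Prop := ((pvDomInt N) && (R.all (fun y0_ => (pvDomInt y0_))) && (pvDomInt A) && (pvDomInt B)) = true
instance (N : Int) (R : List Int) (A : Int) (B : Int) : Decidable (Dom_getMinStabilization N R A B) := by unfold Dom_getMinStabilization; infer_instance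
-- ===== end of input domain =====

-- B replaces A's per-disc sweep over the whole candidate-radius row by slope trick:
-- it maintains only the breakpoints of the convex cost function (objective: faster).

-- ===== PORT A =====
def getMinStabilization (N : Int) (R : List Int) (A : Int) (B : Int) : Int :=
  let R_ := (PySem.List.enumerate R 0).map (fun p => p.2 - p.1)
  let key_radii := PySem.List.sorted (PySem.Set.ofList (R_.map (fun r => max 1 r))) (fun x => x) false
  let cost_for_radius := List.replicate key_radii.length (0 : Int)
  let cost_for_radius := R_.foldl (fun cfr r =>
    (PySem.List.enumerate key_radii 0).foldl (fun cfr p =>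
      let i := p.1
      let key_radius := p.2
      let delta := key_radius - r
      let cost := if delta > 0 then delta * A else -delta * B
      if i == 0 then
        PySem.List.pySetD cfr 0 (PySem.List.pyGetD cfr 0 0 + cost)
      else
        PySem.List.pySetD cfr i (min (PySem.List.pyGetD cfr (i - 1) 0) (PySem.List.pyGetD cfr i 0 + cost))
      ) cfr) cost_for_radius
  (PySem.List.pyGet? cost_for_radius (-1)).getD 0

-- ===== PORT B =====
-- the inner `while need > 0 and bp and bp[0][0] > v` loop of Source B
def pvConsume (v : Int) (need cost : Int) (bp : List (Int × Int)) : Int × Int × List (Int × Int) :=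
  match bp with
  | [] => (need, cost, [])
  | (b, w) :: rest =>
      if need > 0 ∧ b > v then
        let t := min need w
        if t = w then pvConsume v (need - t) (cost + t * (b - v)) rest
        else (need - t, cost + t * (b - v), (b, w - t) :: rest)
      else (need, cost, (b, w) :: rest)

-- the `j` scan followed by `bp.insert(j, [v, wnew])` of Source B
def pvInsert (v w : Int) : List (Int × Int) → List (Int × Int)
  | [] => [(v, w)]
  | (b, u) :: rest => if b > v then (b, u) :: pvInsert v w rest else (v, w) :: (b, u) :: rest

-- one iteration of Source B's `for i, r in enumerate(R)` loop body, on state (cost, bp)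
def pvStepB (A B : Int) (st : Int × List (Int × Int)) (v0 : Int) : Int × List (Int × Int) :=
  let cost0 := if v0 < 1 then st.1 + A * (1 - v0) else st.1
  let v := if v0 < 1 then 1 else v0
  let r := pvConsume v A cost0 st.2
  let wnew := B + (A - r.1)
  (r.2.1, if wnew > 0 then pvInsert v wnew r.2.2 else r.2.2)

def getMinStabilization_alt (N : Int) (R : List Int) (A : Int) (B : Int) : Int :=
  ((PySem.List.enumerate R 0).foldl (fun st p => pvStepB A B st (p.2 - p.1)) ((0 : Int), ([] : List (Int × Int)))).1

-- ===== PRECONDITION & SPEC =====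
-- Pre_ excludes R = [], where A raises IndexError (cost_for_radius[-1] on []), and
-- restricts to the task's natural domain of nonnegative per-unit costs A, B: for a
-- negative A or B the problem is no longer convex and A's table value is meaningless,
-- and B's slope-trick algorithm does not reproduce it (examples in the claim's cites);
-- inputs whose adjusted radii max(1, R[i]-i) all coincide are kept for every A, B.
def Pre_getMinStabilization (N : Int) (R : List Int) (A : Int) (B : Int) : Prop :=
  R ≠ [] ∧ (0 ≤ A ∧ 0 ≤ B ∨
    ∀ p ∈ PySem.List.enumerate R 0, max 1 (p.2 - p.1) = max 1 (R.getD 0 0))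
instance (N : Int) (R : List Int) (A : Int) (B : Int) : Decidable (Pre_getMinStabilization N R A B) := by unfold Pre_getMinStabilization; infer_instance
def pvWitness_getMinStabilization : Int × List Int × Int × Int := (3, [4, 1, 3], 2, 5)

def Spec_getMinStabilization (N : Int) (R : List Int) (A : Int) (B : Int) (out : Int) : Prop := out = getMinStabilization_alt N R A B
instance (N : Int) (R : List Int) (A : Int) (B : Int) (out : Int) : Decidable (Spec_getMinStabilization N R A B out) := by unfold Spec_getMinStabilization; infer_instance

-- ===== CLAIM (what is proved, stated in full; the proofs are below) =====
def Claim_equal_getMinStabilization : Prop := ∀ (N : Int) (R : List Int) (A : Int) (B : Int), Dom_getMinStabilization N R A B → Pre_getMinStabilization N R A B → Spec_getMinStabilization N R A B (getMinStabilization N R A B)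

-- ===== LEMMAS AND PROOFS =====

-- cost of moving a (re-indexed) radius v to target k, as A computes it
def pvCost (Aa Bb k v : Int) : Int := if k - v > 0 then (k - v) * Aa else -(k - v) * Bb

-- one row-relaxation step of A's DP table (A's inner loop, abstractly)
def pvRowNext (Aa Bb v : Int) : List Int → List Int → Option Int → List Int
  | k :: ks, x :: xs, prev =>
      let c := pvCost Aa Bb k v
      let y := match prev with
        | none => x + c
        | some p => min p (x + c)
      y :: pvRowNext Aa Bb v ks xs (some y)
  | _, _, _ => []

theorem pvRowNext_length (Aa Bb v : Int) :
    ∀ (ks xs : List Int) (prev : Option Int),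
      (pvRowNext Aa Bb v ks xs prev).length = min ks.length xs.length := by
  intro ks
  induction ks with
  | nil => intro xs prev; cases xs <;> simp [pvRowNext]
  | cons k ks ih =>
      intro xs prev
      cases xs with
      | nil => simp [pvRowNext]
      | cons x xs => simp [pvRowNext, ih xs]; try omega

theorem pvRowNext_getD_zero (Aa Bb v k x : Int) (ks xs : List Int) :
    (pvRowNext Aa Bb v (k :: ks) (x :: xs) none).getD 0 0 = x + pvCost Aa Bb k v := by
  simp [pvRowNext]

theorem pvRowNext_getD_succ (Aa Bb v : Int) :
    ∀ (m : Nat) (ks xs : List Int) (prev : Option Int),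
      m + 1 < ks.length → ks.length = xs.length →
      (pvRowNext Aa Bb v ks xs prev).getD (m + 1) 0 =
        min ((pvRowNext Aa Bb v ks xs prev).getD m 0)
            (xs.getD (m + 1) 0 + pvCost Aa Bb (ks.getD (m + 1) 0) v) := by
  intro m
  induction m with
  | zero =>
      intro ks xs prev h1 h2
      rcases ks with _ | ⟨k0, ks⟩; · simp at h1
      rcases ks with _ | ⟨k1, ks⟩; · simp at h1
      rcases xs with _ | ⟨x0, xs⟩; · simp at h2
      rcases xs with _ | ⟨x1, xs⟩; · simp at h2
      cases prev <;> simp [pvRowNext]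
  | succ m ih =>
      intro ks xs prev h1 h2
      rcases ks with _ | ⟨k0, ks⟩; · simp at h1
      rcases xs with _ | ⟨x0, xs⟩; · simp at h2
      have h1' : m + 1 < ks.length := by simp at h1; omega
      have h2' : ks.length = xs.length := by simpa using h2
      simpa [pvRowNext] using ih ks xs _ h1' h2'

theorem pvSet_take_drop (l : List Int) (n : Nat) (y : Int) (h : n < l.length) :
    l.set n y = l.take n ++ y :: l.drop (n + 1) := by
  rw [List.set_eq_take_append_cons_drop, if_pos h]

theorem pvInnerA_aux (Aa Bb r : Int) :
    ∀ (ks : List Int) (m : Nat) (a : List Int), 1 ≤ m → m + ks.length = a.length →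
      (PySem.List.enumerate ks (m : Int)).foldl (fun cfr p =>
        let i := p.1
        let key_radius := p.2
        let delta := key_radius - r
        let cost := if delta > 0 then delta * Aa else -delta * Bb
        if i == 0 then
          PySem.List.pySetD cfr 0 (PySem.List.pyGetD cfr 0 0 + cost)
        else
          PySem.List.pySetD cfr i (min (PySem.List.pyGetD cfr (i - 1) 0) (PySem.List.pyGetD cfr i 0 + cost))) a
      = a.take m ++ pvRowNext Aa Bb r ks (a.drop m) (some (a.getD (m - 1) 0)) := by
  intro ks
  induction ks with
  | nil =>
      intro m a hm hlen
      simp only [PySem.List.enumerate_nil, List.foldl_nil, pvRowNext]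
      have h1 : a.drop m = [] := by apply List.drop_eq_nil_of_le; simp at hlen; omega
      have h2 : a.take m = a := by apply List.take_of_length_le; simp at hlen; omega
      simp [h2]
  | cons k ks ih =>
      intro m a hm hlen
      have hmlt : m < a.length := by simp at hlen; omega
      rw [PySem.List.enumerate_cons, List.foldl_cons]
      simp only
      rw [if_neg (by simp; omega)]
      rw [show ((m : Int) - 1) = ((m - 1 : Nat) : Int) by omega]
      simp only [PySem.List.pySetD_natCast, PySem.List.pyGetD_natCast]
      rw [show ((m : Int) + 1) = ((m + 1 : Nat) : Int) by omega]
      rw [ih (m + 1) _ (by omega) (by simp at hlen ⊢; omega)]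
      rw [pvSet_take_drop a m _ hmlt]
      have htk : (a.take m ++ (min (a.getD (m - 1) 0) (a.getD m 0 + (if k - r > 0 then (k - r) * Aa else -(k - r) * Bb))) :: a.drop (m + 1)).take (m + 1)
          = a.take m ++ [min (a.getD (m - 1) 0) (a.getD m 0 + (if k - r > 0 then (k - r) * Aa else -(k - r) * Bb))] := by
        rw [List.take_append]
        simp [List.length_take, Nat.min_eq_left (le_of_lt hmlt), List.take_succ_cons]
      have hdr : (a.take m ++ (min (a.getD (m - 1) 0) (a.getD m 0 + (if k - r > 0 then (k - r) * Aa else -(k - r) * Bb))) :: a.drop (m + 1)).drop (m + 1)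
          = a.drop (m + 1) := by
        rw [List.drop_append]
        simp [List.length_take, Nat.min_eq_left (le_of_lt hmlt)]
      have hgd : (a.take m ++ (min (a.getD (m - 1) 0) (a.getD m 0 + (if k - r > 0 then (k - r) * Aa else -(k - r) * Bb))) :: a.drop (m + 1)).getD m 0
          = min (a.getD (m - 1) 0) (a.getD m 0 + (if k - r > 0 then (k - r) * Aa else -(k - r) * Bb)) := by
        rw [List.getD_eq_getElem?_getD, List.getElem?_append_right (by simp [Nat.min_eq_left (le_of_lt hmlt)])]
        simp [Nat.min_eq_left (le_of_lt hmlt)]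
      simp only [Nat.add_sub_cancel]
      rw [htk, hdr, hgd]
      rw [List.drop_eq_getElem_cons hmlt]
      simp only [pvRowNext, List.append_assoc, List.cons_append, List.nil_append]
      rw [List.getD_eq_getElem a 0 hmlt]
      rfl

theorem pvInnerA (Aa Bb r : Int) (keys : List Int) :
    ∀ (a : List Int), a.length = keys.length →
      (PySem.List.enumerate keys 0).foldl (fun cfr p =>
        let i := p.1
        let key_radius := p.2
        let delta := key_radius - r
        let cost := if delta > 0 then delta * Aa else -delta * Bb
        if i == 0 then
          PySem.List.pySetD cfr 0 (PySem.List.pyGetD cfr 0 0 + cost)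
        else
          PySem.List.pySetD cfr i (min (PySem.List.pyGetD cfr (i - 1) 0) (PySem.List.pyGetD cfr i 0 + cost))) a
      = pvRowNext Aa Bb r keys a none := by
  cases keys with
  | nil =>
      intro a ha
      have : a = [] := List.eq_nil_of_length_eq_zero (by simpa using ha)
      subst this
      simp [PySem.List.enumerate_nil, pvRowNext]
  | cons k kt =>
      intro a ha
      rcases a with _ | ⟨x, xt⟩; · simp at ha
      rw [PySem.List.enumerate_cons, List.foldl_cons]
      dsimp only
      rw [if_pos (by norm_num)]
      rw [PySem.List.pySetD_of_nonneg _ _ (by norm_num), PySem.List.pyGetD_zero_cons]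
      rw [show ((0:Int) + 1) = ((1 : Nat) : Int) by norm_num]
      rw [pvInnerA_aux Aa Bb r kt 1 _ (by omega) (by simp at ha ⊢; omega)]
      simp only [Int.toNat_zero, List.set_cons_zero, List.take_succ_cons, List.take_zero,
        List.drop_succ_cons, List.drop_zero]
      simp [pvRowNext, pvCost]

theorem pvRowNext_length_keys (Aa Bb v : Int) (keys row : List Int) (h : row.length = keys.length) :
    (pvRowNext Aa Bb v keys row none).length = keys.length := by
  simp [pvRowNext_length, h]

theorem pvOuterA (Aa Bb : Int) (keys : List Int) :
    ∀ (vs row : List Int), row.length = keys.length →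
      vs.foldl (fun cfr r =>
        (PySem.List.enumerate keys 0).foldl (fun cfr p =>
          let i := p.1
          let key_radius := p.2
          let delta := key_radius - r
          let cost := if delta > 0 then delta * Aa else -delta * Bb
          if i == 0 then
            PySem.List.pySetD cfr 0 (PySem.List.pyGetD cfr 0 0 + cost)
          else
            PySem.List.pySetD cfr i (min (PySem.List.pyGetD cfr (i - 1) 0) (PySem.List.pyGetD cfr i 0 + cost))) cfr) row
      = vs.foldl (fun row v => pvRowNext Aa Bb v keys row none) row := by
  intro vs
  induction vs with
  | nil => intro row h; rfl
  | cons v vs ih =>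
      intro row h
      simp only [List.foldl_cons]
      rw [pvInnerA Aa Bb v keys row h, ih _ (pvRowNext_length_keys Aa Bb v keys row h)]

theorem pvFoldRows_length (Aa Bb : Int) (keys : List Int) :
    ∀ (vs row : List Int), row.length = keys.length →
      (vs.foldl (fun row v => pvRowNext Aa Bb v keys row none) row).length = keys.length := by
  intro vs
  induction vs with
  | nil => intro row h; simpa using h
  | cons v vs ih =>
      intro row h
      simp only [List.foldl_cons]
      exact ih _ (pvRowNext_length_keys Aa Bb v keys row h)

theorem pvRepl_getD (n j : Nat) : (List.replicate n (0 : Int)).getD j 0 = 0 := by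
  rw [List.getD_eq_getElem?_getD, List.getElem?_replicate]
  split <;> rfl

-- ===== the slope-trick (B) side, abstractly =====

-- value at k of the breakpoint multiset: sum of w * max 0 (b - k)
def pvS (bp : List (Int × Int)) (k : Int) : Int :=
  (bp.map (fun p => p.2 * max 0 (p.1 - k))).sum

theorem pvS_nil (k : Int) : pvS [] k = 0 := rfl

theorem pvS_cons (p : Int × Int) (l : List (Int × Int)) (k : Int) :
    pvS (p :: l) k = p.2 * max 0 (p.1 - k) + pvS l k := by
  simp [pvS]

theorem pvS_mono (bp : List (Int × Int)) (hw : ∀ p ∈ bp, 0 ≤ p.2) {k k' : Int} (h : k ≤ k') :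
    pvS bp k' ≤ pvS bp k := by
  induction bp with
  | nil => simp [pvS_nil]
  | cons p l ih =>
      rw [pvS_cons, pvS_cons]
      have h1 : p.2 * max 0 (p.1 - k') ≤ p.2 * max 0 (p.1 - k) := by
        apply mul_le_mul_of_nonneg_left _ (hw p (by simp))
        omega
      have h2 := ih (fun q hq => hw q (by simp [hq]))
      omega

theorem pvS_zero_of_le (bp : List (Int × Int)) (k : Int) (h : ∀ p ∈ bp, p.1 ≤ k) :
    pvS bp k = 0 := by
  induction bp with
  | nil => rfl
  | cons p l ih =>
      rw [pvS_cons, ih (fun q hq => h q (by simp [hq]))]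
      have : max 0 (p.1 - k) = 0 := by have := h p (by simp); omega
      rw [this]; ring

theorem pvInsert_S (v w : Int) (bp : List (Int × Int)) (k : Int) :
    pvS (pvInsert v w bp) k = w * max 0 (v - k) + pvS bp k := by
  induction bp with
  | nil => simp [pvInsert, pvS_cons, pvS_nil]
  | cons p l ih =>
      rcases p with ⟨b, u⟩
      by_cases h : b > v
      · simp only [pvInsert, if_pos h, pvS_cons, ih]
        ring
      · simp only [pvInsert, if_neg h, pvS_cons]
        try ring

theorem pvInsert_mem (v w : Int) (bp : List (Int × Int)) (p : Int × Int)
    (h : p ∈ pvInsert v w bp) : p = (v, w) ∨ p ∈ bp := by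
  induction bp with
  | nil => simpa [pvInsert] using h
  | cons q l ih =>
      rcases q with ⟨b, u⟩
      by_cases hb : b > v
      · simp only [pvInsert, if_pos hb, List.mem_cons] at h
        rcases h with h | h
        · right; simp [h]
        · rcases ih h with h' | h'
          · left; exact h'
          · right; simp [h']
      · simp only [pvInsert, if_neg hb, List.mem_cons] at h
        rcases h with h | h
        · left; exact h
        · right; simpa using h

theorem pvInsert_pairwise (v w : Int) (bp : List (Int × Int))
    (h : bp.Pairwise (fun p q => q.1 ≤ p.1)) :
    (pvInsert v w bp).Pairwise (fun p q => q.1 ≤ p.1) := by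
  induction bp with
  | nil => simp [pvInsert]
  | cons q l ih =>
      rcases q with ⟨b, u⟩
      rcases List.pairwise_cons.mp h with ⟨hb, hl⟩
      by_cases hbv : b > v
      · simp only [pvInsert, if_pos hbv]
        refine List.pairwise_cons.mpr ⟨?_, ih hl⟩
        intro p hp
        rcases pvInsert_mem v w l p hp with h' | h'
        · simp [h']; omega
        · exact hb p h'
      · simp only [pvInsert, if_neg hbv]
        refine List.pairwise_cons.mpr ⟨?_, h⟩
        intro p hp
        rcases List.mem_cons.mp hp with h' | h'
        · simp [h']; omega
        · have := hb p h'; simp at this ⊢; omega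

theorem pvConsume_spec (v : Int) :
    ∀ (bp : List (Int × Int)) (need cost n' c' : Int) (bp' : List (Int × Int)),
      0 ≤ need →
      bp.Pairwise (fun p q => q.1 ≤ p.1) →
      (∀ p ∈ bp, 0 < p.2) →
      pvConsume v need cost bp = (n', c', bp') →
      (0 ≤ n' ∧ n' ≤ need) ∧
      bp'.Pairwise (fun p q => q.1 ≤ p.1) ∧
      (∀ p ∈ bp', 0 < p.2) ∧
      (∀ p ∈ bp', ∃ q ∈ bp, p.1 = q.1) ∧
      (∀ k, k ≤ v → c' + pvS bp' k + (need - n') * (v - k) = cost + pvS bp k) ∧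
      (∀ k, v < k → c' + pvS bp' k ≤ cost + pvS bp k + (need - n') * (k - v)) ∧
      (∀ k, v < k → (∃ p ∈ bp', k ≤ p.1) →
        n' = 0 ∧ c' + pvS bp' k = cost + pvS bp k + (need - n') * (k - v)) := by
  intro bp
  induction bp with
  | nil =>
      intro need cost n' c' bp' hn _ _ heq
      simp only [pvConsume, Prod.mk.injEq] at heq
      obtain ⟨h1, h2, h3⟩ := heq
      subst h1; subst h2; subst h3
      refine ⟨⟨hn, le_refl _⟩, by simp, by simp, by simp, ?_, ?_, ?_⟩
      · intro k _
        simp [pvS_nil]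
        try ring
      · intro k _; simp [pvS_nil]
      · intro k _ h; simp at h
  | cons hd rest ih =>
      intro need cost n' c' bp' hn hpw hwt heq
      rcases hd with ⟨b, w⟩
      rcases List.pairwise_cons.mp hpw with ⟨hble, hpwr⟩
      have hw0 : 0 < w := hwt (b, w) (by simp)
      by_cases hg : need > 0 ∧ b > v
      · simp only [pvConsume, if_pos hg] at heq
        by_cases ht : min need w = w
        · rw [if_pos ht] at heq
          have hwle : w ≤ need := by omega
          have := ih (need - w) (cost + w * (b - v)) n' c' bp' (by omega) hpwr
            (fun p hp => hwt p (by simp [hp])) (by rw [ht] at heq; exact heq)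
          obtain ⟨⟨hn0, hn1⟩, hpw', hwt', hbk', hc2, hc3, hc4⟩ := this
          refine ⟨⟨hn0, by omega⟩, hpw', hwt', ?_, ?_, ?_, ?_⟩
          · intro p hp; obtain ⟨q, hq, hq'⟩ := hbk' p hp
            exact ⟨q, by simp [hq], hq'⟩
          · intro k hk
            have hmax : max 0 (b - k) = b - k := by omega
            rw [pvS_cons, hmax]
            have := hc2 k hk
            linear_combination this
          · intro k hk
            have h3 := hc3 k hk
            rw [pvS_cons]
            rcases le_or_gt k b with hbk | hbk
            · have hmax : max 0 (b - k) = b - k := by omega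
              rw [hmax]; linarith [h3]
            · have hmax : max 0 (b - k) = 0 := by omega
              rw [hmax]
              have hmul : w * (b - v) ≤ w * (k - v) := by
                apply mul_le_mul_of_nonneg_left _ (le_of_lt hw0); omega
              linarith [h3]
          · intro k hk hex
            obtain ⟨hn', heq'⟩ := hc4 k hk hex
            obtain ⟨p, hp, hkp⟩ := hex
            obtain ⟨q, hq, hq'⟩ := hbk' p hp
            have hqb : q.1 ≤ b := hble q hq
            have hbk : k ≤ b := by omega
            have hmax : max 0 (b - k) = b - k := by omega
            refine ⟨hn', ?_⟩
            rw [pvS_cons, hmax]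
            linear_combination heq'
        · rw [if_neg ht] at heq
          have htn : min need w = need := by omega
          rw [htn] at heq
          have hnw : need < w := by omega
          simp only [Prod.mk.injEq] at heq
          obtain ⟨h1, h2, h3⟩ := heq
          subst h1; subst h2; subst h3
          refine ⟨⟨by omega, by omega⟩, ?_, ?_, ?_, ?_, ?_, ?_⟩
          · refine List.pairwise_cons.mpr ⟨?_, hpwr⟩
            intro p hp; exact hble p hp
          · intro p hp
            rcases List.mem_cons.mp hp with h' | h'
            · simp [h']; omega
            · exact hwt p (by simp [h'])
          · intro p hp
            rcases List.mem_cons.mp hp with h' | h'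
            · exact ⟨(b, w), by simp, by simp [h']⟩
            · exact ⟨p, by simp [h'], rfl⟩
          · intro k hk
            have hmax : max 0 (b - k) = b - k := by omega
            rw [pvS_cons, pvS_cons, hmax]; ring
          · intro k hk
            rw [pvS_cons, pvS_cons]
            rcases le_or_gt k b with hbk | hbk
            · have hmax : max 0 (b - k) = b - k := by omega
              rw [hmax]; ring_nf; omega
            · have hmax : max 0 (b - k) = 0 := by omega
              rw [hmax]
              have hmul : need * (b - v) ≤ need * (k - v) := by
                apply mul_le_mul_of_nonneg_left _ (by omega); omega
              ring_nf; ring_nf at hmul; omega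
          · intro k hk hex
            obtain ⟨p, hp, hkp⟩ := hex
            have hpb : p.1 ≤ b := by
              rcases List.mem_cons.mp hp with h' | h'
              · simp [h']
              · exact hble p h'
            have hbk : k ≤ b := le_trans hkp hpb
            have hmax : max 0 (b - k) = b - k := by omega
            refine ⟨by ring, ?_⟩
            rw [pvS_cons, pvS_cons, hmax]; ring
      · simp only [pvConsume, if_neg hg, Prod.mk.injEq] at heq
        obtain ⟨h1, h2, h3⟩ := heq
        subst h1; subst h2; subst h3
        refine ⟨⟨hn, le_refl _⟩, hpw, hwt, fun p hp => ⟨p, hp, rfl⟩, ?_, ?_, ?_⟩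
        · intro k _; ring
        · intro k _; simp
        · intro k hk hex
          obtain ⟨p, hp, hkp⟩ := hex
          have hpb : p.1 ≤ b := by
            rcases List.mem_cons.mp hp with h' | h'
            · simp [h']
            · exact hble p h'
          have hbv : b > v := by omega
          have hne : need = 0 := by omega
          subst hne
          exact ⟨rfl, by ring⟩

-- strict-sorted key list: indexing facts
theorem pvKeys_mono (keys : List Int) (hs : keys.Pairwise (· < ·)) (p q : Nat)
    (hq : q < keys.length) (hpq : p ≤ q) :
    keys[p]'(by omega) ≤ keys[q]'hq := by
  rcases Nat.lt_or_ge p q with h | h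
  · exact le_of_lt ((List.pairwise_iff_getElem.mp hs) p q (by omega) hq h)
  · have : p = q := by omega
    subst this; exact le_refl _

theorem pvKeys_min (keys : List Int) (hs : keys.Pairwise (· < ·)) (b : Int) (hb : b ∈ keys)
    (h0 : 0 < keys.length) : keys[0]'h0 ≤ b := by
  obtain ⟨j, hj, rfl⟩ := List.mem_iff_getElem.mp hb
  exact pvKeys_mono keys hs 0 j hj (by omega)

theorem pvKeys_max (keys : List Int) (hs : keys.Pairwise (· < ·)) (b : Int) (hb : b ∈ keys)
    (h0 : 0 < keys.length) : b ≤ keys[keys.length - 1]'(by omega) := by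
  obtain ⟨j, hj, rfl⟩ := List.mem_iff_getElem.mp hb
  exact pvKeys_mono keys hs j (keys.length - 1) (by omega) (by omega)

theorem pvKeys_adj (keys : List Int) (hs : keys.Pairwise (· < ·)) (i : Nat)
    (hi : i + 1 < keys.length) (b : Int) (hb : b ∈ keys)
    (hgt : keys[i]'(by omega) < b) : keys[i + 1]'hi ≤ b := by
  obtain ⟨j, hj, rfl⟩ := List.mem_iff_getElem.mp hb
  have : ¬ j ≤ i := by
    intro h
    exact absurd (pvKeys_mono keys hs j i (by omega) h) (by omega)
  exact pvKeys_mono keys hs (i + 1) j hj (by omega)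

-- the loop invariant: the DP row over the key grid is the evaluation of the
-- slope-trick state (cost, breakpoints)
def pvInv (keys : List Int) (row : List Int) (cost : Int) (bp : List (Int × Int)) : Prop :=
  row.length = keys.length ∧
  (∀ i (h : i < keys.length), row.getD i 0 = cost + pvS bp (keys[i]'h)) ∧
  bp.Pairwise (fun p q => q.1 ≤ p.1) ∧
  (∀ p ∈ bp, 0 < p.2) ∧
  (∀ p ∈ bp, p.1 ∈ keys)

theorem pvCost_le (Aa Bb k v0 : Int) (hk1 : 1 ≤ k) (hkv : k ≤ max 1 v0) :
    pvCost Aa Bb k v0 = Aa * (max 1 v0 - v0) + Bb * (max 1 v0 - k) := by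
  unfold pvCost
  rcases le_or_gt 1 v0 with h | h
  · have hv : max 1 v0 = v0 := by omega
    rw [hv] at hkv ⊢
    rw [if_neg (by omega)]; ring
  · have hv : max 1 v0 = 1 := by omega
    have hk : k = 1 := by omega
    rw [hv, hk, if_pos (by omega)]; ring

theorem pvCost_gt (Aa Bb k v0 : Int) (hkv : max 1 v0 < k) :
    pvCost Aa Bb k v0 = Aa * (max 1 v0 - v0) + Aa * (k - max 1 v0) := by
  unfold pvCost
  rw [if_pos (by omega)]; ring

theorem pvStep_spec (keys : List Int) (Aa Bb v0 : Int) (hA : 0 ≤ Aa) (hB : 0 ≤ Bb)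
    (hs : keys.Pairwise (· < ·)) (h1 : ∀ k ∈ keys, 1 ≤ k) (hv : max 1 v0 ∈ keys)
    (row : List Int) (cost : Int) (bp : List (Int × Int))
    (hinv : pvInv keys row cost bp) :
    pvInv keys (pvRowNext Aa Bb v0 keys row none)
      (pvStepB Aa Bb (cost, bp) v0).1 (pvStepB Aa Bb (cost, bp) v0).2 := by
  obtain ⟨hlen, heval, hpw, hwt, hmem⟩ := hinv
  set v : Int := max 1 v0 with hvdef
  set cost0 : Int := if v0 < 1 then cost + Aa * (1 - v0) else cost with hc0
  have hveq : (if v0 < 1 then (1 : Int) else v0) = v := by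
    rcases lt_or_ge v0 1 with h | h
    · rw [if_pos h]; omega
    · rw [if_neg (by omega)]; omega
  have hcost0 : cost0 = cost + Aa * (v - v0) := by
    rcases lt_or_ge v0 1 with h | h
    · rw [hc0, if_pos h]
      have : v = 1 := by omega
      rw [this]
    · rw [hc0, if_neg (by omega)]
      have : v = v0 := by omega
      rw [this]; ring
  set n' : Int := (pvConsume v Aa cost0 bp).1 with hn'
  set c' : Int := (pvConsume v Aa cost0 bp).2.1 with hcp
  set bp' : List (Int × Int) := (pvConsume v Aa cost0 bp).2.2 with hbp'
  have hconsEq : pvConsume v Aa cost0 bp = (n', c', bp') := rfl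
  obtain ⟨⟨hn0, hn1⟩, hpw', hwt', hbk', hc2, hc3, hc4⟩ :=
    pvConsume_spec v bp Aa cost0 n' c' bp' hA hpw hwt hconsEq
  set wnew : Int := Bb + (Aa - n') with hwnew
  set bp₂ : List (Int × Int) := if wnew > 0 then pvInsert v wnew bp' else bp' with hbp₂
  have hstep : pvStepB Aa Bb (cost, bp) v0 = (c', bp₂) := by
    simp only [pvStepB, hveq, ← hc0, hconsEq]
    rfl
  have hwnn : 0 ≤ wnew := by omega
  have hS2 : ∀ k, pvS bp₂ k = wnew * max 0 (v - k) + pvS bp' k := by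
    intro k
    rw [hbp₂]
    by_cases h : wnew > 0
    · rw [if_pos h, pvInsert_S]
    · rw [if_neg h]
      have : wnew = 0 := by omega
      rw [this]; ring
  have hwt₂ : ∀ p ∈ bp₂, 0 < p.2 := by
    intro p hp
    rw [hbp₂] at hp
    by_cases h : wnew > 0
    · rw [if_pos h] at hp
      rcases pvInsert_mem v wnew bp' p hp with h' | h'
      · simp [h']; omega
      · exact hwt' p h'
    · rw [if_neg h] at hp; exact hwt' p hp
  have hmem₂ : ∀ p ∈ bp₂, p.1 ∈ keys := by
    intro p hp
    rw [hbp₂] at hp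
    have hfrom' : ∀ q ∈ bp', q.1 ∈ keys := by
      intro q hq
      obtain ⟨q', hq', he⟩ := hbk' q hq
      rw [he]; exact hmem q' hq'
    by_cases h : wnew > 0
    · rw [if_pos h] at hp
      rcases pvInsert_mem v wnew bp' p hp with h' | h'
      · rw [h']; exact hv
      · exact hfrom' p h'
    · rw [if_neg h] at hp; exact hfrom' p hp
  have hpw₂ : bp₂.Pairwise (fun p q => q.1 ≤ p.1) := by
    rw [hbp₂]
    by_cases h : wnew > 0
    · rw [if_pos h]; exact pvInsert_pairwise v wnew bp' hpw'
    · rw [if_neg h]; exact hpw'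
  -- H = g at key points ≤ v
  have hHeqle : ∀ k, 1 ≤ k → k ≤ v → c' + pvS bp₂ k = cost + pvS bp k + pvCost Aa Bb k v0 := by
    intro k hk1 hkv
    rw [hS2, pvCost_le Aa Bb k v0 hk1 hkv, ← hvdef]
    have hmax : max 0 (v - k) = v - k := by omega
    rw [hmax]
    have h2 := hc2 k hkv
    rw [hcost0] at h2
    linear_combination h2
  -- H ≤ g at key points > v
  have hHle : ∀ k, v < k → c' + pvS bp₂ k ≤ cost + pvS bp k + pvCost Aa Bb k v0 := by
    intro k hkv
    rw [hS2, pvCost_gt Aa Bb k v0 hkv, ← hvdef]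
    have hmax : max 0 (v - k) = 0 := by omega
    rw [hmax]
    have h3 := hc3 k hkv
    rw [hcost0] at h3
    have hmul : (Aa - n') * (k - v) ≤ Aa * (k - v) := by
      apply mul_le_mul_of_nonneg_right _ (by omega)
      omega
    linarith [h3, hmul]
  -- H = g at key points > v that still lie under a live breakpoint
  have hHeqwit : ∀ k, v < k → (∃ p ∈ bp₂, k ≤ p.1) →
      c' + pvS bp₂ k = cost + pvS bp k + pvCost Aa Bb k v0 := by
    intro k hkv hex
    have hex' : ∃ p ∈ bp', k ≤ p.1 := by
      obtain ⟨p, hp, hkp⟩ := hex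
      rw [hbp₂] at hp
      by_cases h : wnew > 0
      · rw [if_pos h] at hp
        rcases pvInsert_mem v wnew bp' p hp with h' | h'
        · exfalso; rw [h'] at hkp; simp at hkp; omega
        · exact ⟨p, h', hkp⟩
      · rw [if_neg h] at hp; exact ⟨p, hp, hkp⟩
    obtain ⟨hn'0, heq'⟩ := hc4 k hkv hex'
    rw [hS2, pvCost_gt Aa Bb k v0 hkv, ← hvdef]
    have hmax : max 0 (v - k) = 0 := by omega
    rw [hmax]
    rw [hcost0, hn'0] at heq'
    linear_combination heq'
  have hknil : 0 < keys.length := by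
    rcases keys with _ | ⟨k, kt⟩
    · simp at hv
    · simp
  have hK0v : keys[0]'hknil ≤ v := pvKeys_min keys hs v hv hknil
  -- the new row evaluates the new slope-trick state
  have hneweval : ∀ i (h : i < keys.length),
      (pvRowNext Aa Bb v0 keys row none).getD i 0 = c' + pvS bp₂ (keys[i]'h) := by
    intro i
    induction i with
    | zero =>
        intro h
        rcases keys with _ | ⟨k0, kt⟩
        · simp at h
        · rcases row with _ | ⟨x0, xt⟩
          · simp at hlen
          · rw [pvRowNext_getD_zero]
            have he0 := heval 0 h
            simp only [List.getElem_cons_zero, List.getD_cons_zero] at he0 ⊢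
            rw [he0]
            have hk1 : (1 : Int) ≤ k0 := h1 k0 (by simp)
            have := hHeqle k0 hk1 (by simpa using hK0v)
            omega
    | succ i ih =>
        intro h
        have hi : i < keys.length := by omega
        have hrec := pvRowNext_getD_succ Aa Bb v0 i keys row none h hlen.symm
        rw [hrec, ih hi]
        have hgd : keys.getD (i + 1) 0 = keys[i + 1]'h := List.getD_eq_getElem keys 0 h
        have hrowd : row.getD (i + 1) 0 = cost + pvS bp (keys[i + 1]'h) := heval (i + 1) h
        rw [hgd, hrowd]
        have hmono_k : keys[i]'hi ≤ keys[i + 1]'h := pvKeys_mono keys hs i (i + 1) h (by omega)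
        have hmono' : c' + pvS bp₂ (keys[i + 1]'h) ≤ c' + pvS bp₂ (keys[i]'hi) := by
          have := pvS_mono bp₂ (fun p hp => le_of_lt (hwt₂ p hp)) hmono_k
          omega
        by_cases hc : keys[i + 1]'h ≤ v
        · have heq := hHeqle (keys[i + 1]'h) (h1 _ (by simp)) hc
          rw [← heq]
          omega
        · push_neg at hc
          by_cases hex : ∃ p ∈ bp₂, keys[i]'hi < p.1
          · obtain ⟨p, hp, hpi⟩ := hex
            have hadj : keys[i + 1]'h ≤ p.1 := pvKeys_adj keys hs i h p.1 (hmem₂ p hp) hpi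
            have heq := hHeqwit (keys[i + 1]'h) hc ⟨p, hp, hadj⟩
            rw [← heq]
            omega
          · push_neg at hex
            have hz1 : pvS bp₂ (keys[i]'hi) = 0 := pvS_zero_of_le bp₂ _ hex
            have hz2 : pvS bp₂ (keys[i + 1]'h) = 0 :=
              pvS_zero_of_le bp₂ _ (fun p hp => le_trans (hex p hp) hmono_k)
            have hle := hHle (keys[i + 1]'h) hc
            rw [hz1, hz2] at *
            omega
  rw [hstep]
  exact ⟨pvRowNext_length_keys Aa Bb v0 keys row hlen, hneweval, hpw₂, hwt₂, hmem₂⟩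

theorem pvFoldInv (keys : List Int) (Aa Bb : Int) (hA : 0 ≤ Aa) (hB : 0 ≤ Bb)
    (hs : keys.Pairwise (· < ·)) (h1 : ∀ k ∈ keys, 1 ≤ k) :
    ∀ (vals : List Int) (row : List Int) (cost : Int) (bp : List (Int × Int)),
      (∀ u ∈ vals, max 1 u ∈ keys) →
      pvInv keys row cost bp →
      pvInv keys (vals.foldl (fun row u => pvRowNext Aa Bb u keys row none) row)
        (vals.foldl (pvStepB Aa Bb) (cost, bp)).1
        (vals.foldl (pvStepB Aa Bb) (cost, bp)).2 := by
  intro vals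
  induction vals with
  | nil => intro row cost bp _ hinv; simpa using hinv
  | cons u us ih =>
      intro row cost bp hmem hinv
      simp only [List.foldl_cons]
      have hstep := pvStep_spec keys Aa Bb u hA hB hs h1 (hmem u (by simp)) row cost bp hinv
      have := ih (pvRowNext Aa Bb u keys row none)
        (pvStepB Aa Bb (cost, bp) u).1 (pvStepB Aa Bb (cost, bp) u).2
        (fun x hx => hmem x (by simp [hx])) hstep
      simpa using this


-- ===== the degenerate single-key-radius case (any A, B) =====

theorem pvRowNext_single (Aa Bb u c s : Int) :
    pvRowNext Aa Bb u [c] [s] none = [s + pvCost Aa Bb c u] := by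
  simp [pvRowNext]

theorem pvRowsSingle (Aa Bb c : Int) :
    ∀ (vals : List Int) (s : Int),
      vals.foldl (fun row u => pvRowNext Aa Bb u [c] row none) [s]
        = [vals.foldl (fun s u => s + pvCost Aa Bb c u) s] := by
  intro vals
  induction vals with
  | nil => intro s; rfl
  | cons u us ih =>
      intro s
      simp only [List.foldl_cons, pvRowNext_single]
      exact ih _

theorem pvStepSingle (Aa Bb c u : Int) (hc : max 1 u = c)
    (cost : Int) (bp : List (Int × Int)) (hbp : ∀ p ∈ bp, p.1 = c) :
    (pvStepB Aa Bb (cost, bp) u).1 = cost + pvCost Aa Bb c u ∧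
    (∀ p ∈ (pvStepB Aa Bb (cost, bp) u).2, p.1 = c) := by
  have hvif : (if u < 1 then (1 : Int) else u) = c := by
    rcases lt_or_ge u 1 with h | h
    · rw [if_pos h]; omega
    · rw [if_neg (by omega)]; omega
  have hcons : ∀ (x : Int), pvConsume c Aa x bp = (Aa, x, bp) := by
    intro x
    cases bp with
    | nil => rfl
    | cons hd tl =>
        rcases hd with ⟨b, w⟩
        have hb : b = c := hbp (b, w) (by simp)
        simp only [pvConsume]
        rw [if_neg (by omega)]
  have hbp2 : ∀ p ∈ (pvStepB Aa Bb (cost, bp) u).2, p.1 = c := by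
    intro p hp
    simp only [pvStepB, hvif, hcons] at hp
    by_cases h : Bb + (Aa - Aa) > 0
    · rw [if_pos h] at hp
      rcases pvInsert_mem _ _ _ _ hp with h' | h'
      · simp [h']
      · exact hbp p h'
    · rw [if_neg h] at hp; exact hbp p hp
  refine ⟨?_, hbp2⟩
  simp only [pvStepB, hvif, hcons]
  rcases lt_or_ge u 1 with h | h
  · rw [if_pos h]
    have hc1 : c = 1 := by omega
    rw [hc1]
    unfold pvCost
    rw [if_pos (by omega)]
    ring
  · rw [if_neg (by omega)]
    have hcu : c = u := by omega
    rw [hcu]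
    unfold pvCost
    rw [if_neg (by omega)]
    ring

theorem pvFoldSingle (Aa Bb c : Int) :
    ∀ (vals : List Int) (cost : Int) (bp : List (Int × Int)),
      (∀ u ∈ vals, max 1 u = c) → (∀ p ∈ bp, p.1 = c) →
      (vals.foldl (pvStepB Aa Bb) (cost, bp)).1
        = vals.foldl (fun s u => s + pvCost Aa Bb c u) cost := by
  intro vals
  induction vals with
  | nil => intro cost bp _ _; rfl
  | cons u us ih =>
      intro cost bp hall hbp
      obtain ⟨h1, h2⟩ := pvStepSingle Aa Bb c u (hall u (by simp)) cost bp hbp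
      simp only [List.foldl_cons]
      rw [show pvStepB Aa Bb (cost, bp) u
            = ((pvStepB Aa Bb (cost, bp) u).1, (pvStepB Aa Bb (cost, bp) u).2) from rfl, h1]
      exact ih _ _ (fun x hx => hall x (by simp [hx])) h2

-- ===== VERDICT (by name: the statement is the Claim_ definition above) =====
set_option maxHeartbeats 1000000 in
theorem getMinStabilization_spec : Claim_equal_getMinStabilization := by
  intro N R A B _ hpre
  obtain ⟨hR, hcase⟩ := hpre
  unfold Spec_getMinStabilization
  set vals : List Int := (PySem.List.enumerate R 0).map (fun p => p.2 - p.1) with hvals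
  set keys : List Int :=
    PySem.List.sorted (PySem.Set.ofList (vals.map (fun r => max 1 r))) (fun x => x) false with hkeys
  have hs : keys.Pairwise (· < ·) := PySem.List.sorted_ofList_pairwise_lt _
  have hmemk : ∀ x, x ∈ keys ↔ x ∈ vals.map (fun r => max 1 r) := by
    intro x
    rw [hkeys, PySem.List.mem_sorted, PySem.Set.mem_ofList]
  have hvne : vals ≠ [] := by
    rcases R with _ | ⟨r, rs⟩
    · exact absurd rfl hR
    · simp [hvals, PySem.List.enumerate_cons]
  have hkne : keys ≠ [] := by
    rw [hkeys, Ne, PySem.List.sorted_eq_nil_iff]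
    intro hcon
    rcases List.exists_mem_of_ne_nil vals hvne with ⟨x, hx⟩
    have : max 1 x ∈ PySem.Set.ofList (vals.map (fun r => max 1 r)) := by
      rw [PySem.Set.mem_ofList]
      exact List.mem_map.mpr ⟨x, hx, rfl⟩
    rw [hcon] at this
    simp at this
  have hkl : 0 < keys.length := List.length_pos_of_ne_nil hkne
  -- A's side: the port computes the final DP row
  have hAside : getMinStabilization N R A B =
      (vals.foldl (fun row u => pvRowNext A B u keys row none) (List.replicate keys.length 0)).getD
        (keys.length - 1) 0 := by
    show (PySem.List.pyGet? (vals.foldl _ (List.replicate keys.length (0 : Int))) (-1)).getD 0 = _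
    rw [pvOuterA A B keys vals _ (by simp)]
    have hlen := pvFoldRows_length A B keys vals (List.replicate keys.length 0) (by simp)
    have hne : vals.foldl (fun row u => pvRowNext A B u keys row none)
        (List.replicate keys.length 0) ≠ [] := by
      intro hcon
      rw [hcon] at hlen
      exact hkne (List.eq_nil_of_length_eq_zero hlen.symm)
    rw [PySem.List.pyGet?_neg_one, List.getLast?_eq_getElem?]
    rw [List.getElem?_eq_getElem (by omega :
      (vals.foldl (fun row u => pvRowNext A B u keys row none)
        (List.replicate keys.length 0)).length - 1 <
      (vals.foldl (fun row u => pvRowNext A B u keys row none)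
        (List.replicate keys.length 0)).length)]
    simp only [Option.getD_some]
    rw [List.getD_eq_getElem _ 0 (by omega)]
    congr 1
    omega
  -- B's side: the port computes the final slope-trick cost
  have hBside : getMinStabilization_alt N R A B = (vals.foldl (pvStepB A B) (0, [])).1 := by
    show ((PySem.List.enumerate R 0).foldl (fun st p => pvStepB A B st (p.2 - p.1)) (0, [])).1 = _
    rw [hvals, List.foldl_map]
  rw [hAside, hBside]
  rcases hcase with ⟨hA, hB⟩ | hone
  · -- nonnegative unit costs: the full slope-trick invariant
    have h1 : ∀ k ∈ keys, (1 : Int) ≤ k := by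
      intro k hk
      rw [hmemk] at hk
      obtain ⟨u, _, rfl⟩ := List.mem_map.mp hk
      omega
    have hmaxmem : ∀ u ∈ vals, max 1 u ∈ keys := by
      intro u hu
      rw [hmemk]
      exact List.mem_map.mpr ⟨u, hu, rfl⟩
    have hinv0 : pvInv keys (List.replicate keys.length 0) 0 [] := by
      refine ⟨by simp, ?_, by simp, by simp, by simp⟩
      intro i h
      rw [pvRepl_getD]
      simp [pvS_nil]
    have hinv := pvFoldInv keys A B hA hB hs h1 vals (List.replicate keys.length 0) 0 [] hmaxmem hinv0
    obtain ⟨hlenF, hevalF, _, _, hmemF⟩ := hinv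
    have hlast := hevalF (keys.length - 1) (by omega)
    rw [hlast]
    have hz : pvS (vals.foldl (pvStepB A B) (0, [])).2 (keys[keys.length - 1]'(by omega)) = 0 := by
      apply pvS_zero_of_le
      intro p hp
      exact pvKeys_max keys hs p.1 (hmemF p hp) hkl
    rw [hz]
    ring
  · -- all adjusted radii coincide: both sides are the same running sum (any A, B)
    set c : Int := max 1 (R.getD 0 0) with hc
    have hallc : ∀ u ∈ vals, max 1 u = c := by
      intro u hu
      rw [hvals] at hu
      obtain ⟨p, hp, rfl⟩ := List.mem_map.mp hu
      exact hone p hp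
    have hkc : keys = [c] := by
      have hx : ∀ x ∈ keys, x = c := by
        intro x hx
        rw [hmemk] at hx
        obtain ⟨u, hu, rfl⟩ := List.mem_map.mp hx
        exact hallc u hu
      rcases hkeq : keys with _ | ⟨k, ks⟩
      · exact absurd hkeq hkne
      · have hk : k = c := hx k (by rw [hkeq]; simp)
        rcases hkseq : ks with _ | ⟨y, ys⟩
        · rw [hk]
        · exfalso
          have hy : y = c := hx y (by rw [hkeq, hkseq]; simp)
          have hlt := (List.pairwise_cons.mp (by rw [← hkeq]; exact hs)).1 y (by rw [hkseq]; simp)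
          omega
    rw [hkc]
    simp only [List.length_cons, List.length_nil]
    rw [show List.replicate 1 (0 : Int) = [0] from rfl, pvRowsSingle A B c vals 0]
    rw [pvFoldSingle A B c vals 0 [] hallc (by simp)]
    simp
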